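-- pv_equiv track=rewrite | github.com/zdx3578/popper-arc | bkbias/genbias.py | group_bias_lines
-- ===== SOURCE A (Python) =====
-- from typing import List
--
-- def group_bias_lines(lines: List[str]) -> List[str]:
--     """Group bias  Sorting  lines by predicate category."""
--     cats = {
--         'head_pred': [],
--         'body_pred': [],
--         'type': [],
--         'direction': [],
--         'other': [],
--     }
--     for ln in lines:
--         s = ln.strip()
--         if s.startswith('head_pred'):
--             cats['head_pred'].append(ln)
--         elif s.startswith('body_pred'):
--             cats['body_pred'].append(ln)
--         elif s.startswith('type(') or s.startswith('type '):
--             cats['type'].append(ln)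
--         elif s.startswith('direction'):
--             cats['direction'].append(ln)
--         else:
--             cats['other'].append(ln)
--     grouped: List[str] = []
--     for key in ['head_pred', 'body_pred', 'type', 'direction', 'other']:
--         if cats[key]:
--             grouped.append(f"% === {key} ===")
--             grouped.extend(sorted(cats[key]))
--     return grouped
-- ===== SOURCE B (Python) =====
-- from typing import List
--
-- _NAMES = ['head_pred', 'body_pred', 'type', 'direction', 'other']
--
-- def _rank(ln: str) -> int:
--     s = ln.strip()
--     if s.startswith('head_pred'):
--         return 0
--     if s.startswith('body_pred'):
--         return 1
--     if s.startswith('type(') or s.startswith('type '):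
--         return 2
--     if s.startswith('direction'):
--         return 3
--     return 4
--
-- def group_bias_lines(lines: List[str]) -> List[str]:
--     """Sort-first-then-groupby: one stable double sort, one walk emitting headers."""
--     ordered = sorted(sorted(lines), key=_rank)
--     out: List[str] = []
--     prev = -1
--     for ln in ordered:
--         r = _rank(ln)
--         if r != prev:
--             out.append(f"% === {_NAMES[r]} ===")
--             prev = r
--         out.append(ln)
--     return out
-- ===== Notes on version B (the rewrite author's own statement) =====
-- stated objective: alternative
-- what changed: Replaced A's five-bucket dict (one classifying pass, then a per-bucket sort inside the output loop) by a single stable double sort of all lines (by line, then by category rank) followed by one group-by walk that emits a header whenever the rank changes.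
import Mathlib
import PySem

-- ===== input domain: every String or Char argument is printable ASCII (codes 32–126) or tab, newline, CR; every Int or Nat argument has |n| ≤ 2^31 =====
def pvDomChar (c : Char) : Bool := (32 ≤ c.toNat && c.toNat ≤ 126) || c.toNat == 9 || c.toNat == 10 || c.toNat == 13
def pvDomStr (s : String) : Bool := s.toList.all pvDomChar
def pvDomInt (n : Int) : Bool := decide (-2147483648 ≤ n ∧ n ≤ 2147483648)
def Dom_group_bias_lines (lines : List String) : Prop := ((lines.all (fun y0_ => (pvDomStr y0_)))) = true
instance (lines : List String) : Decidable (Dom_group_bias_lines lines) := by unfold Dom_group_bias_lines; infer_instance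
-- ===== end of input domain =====

-- B replaces A's five-bucket dict (bucketed then sorted per bucket) by one stable double
-- sort of all lines followed by a single group-by walk; objective: alternative decomposition.

-- ===== PORT A =====
-- the dict with five fixed literal keys is ported as a 5-tuple of bucket lists (insertion order preserved)
def gblCats : Type := List String × List String × List String × List String × List String

def gblStep (c : gblCats) (ln : String) : gblCats :=
  if PySem.Str.startswith (PySem.Str.strip ln) "head_pred" then (c.1 ++ [ln], c.2.1, c.2.2.1, c.2.2.2.1, c.2.2.2.2)
  else if PySem.Str.startswith (PySem.Str.strip ln) "body_pred" then (c.1, c.2.1 ++ [ln], c.2.2.1, c.2.2.2.1, c.2.2.2.2)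
  else if PySem.Str.startswith (PySem.Str.strip ln) "type(" || PySem.Str.startswith (PySem.Str.strip ln) "type " then
    (c.1, c.2.1, c.2.2.1 ++ [ln], c.2.2.2.1, c.2.2.2.2)
  else if PySem.Str.startswith (PySem.Str.strip ln) "direction" then (c.1, c.2.1, c.2.2.1, c.2.2.2.1 ++ [ln], c.2.2.2.2)
  else (c.1, c.2.1, c.2.2.1, c.2.2.2.1, c.2.2.2.2 ++ [ln])

def gblSeg (key : String) (bucket : List String) : List String :=
  if bucket.isEmpty then [] else ("% === " ++ key ++ " ===") :: PySem.List.sorted bucket (fun x => x)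

def group_bias_lines (lines : List String) : List String :=
  let cats := lines.foldl gblStep ([], [], [], [], [])
  gblSeg "head_pred" cats.1 ++ gblSeg "body_pred" cats.2.1 ++ gblSeg "type" cats.2.2.1 ++
    gblSeg "direction" cats.2.2.2.1 ++ gblSeg "other" cats.2.2.2.2

-- ===== PORT B =====
def pvNames : List String := ["head_pred", "body_pred", "type", "direction", "other"]

def pvRank (ln : String) : Int :=
  if PySem.Str.startswith (PySem.Str.strip ln) "head_pred" then 0
  else if PySem.Str.startswith (PySem.Str.strip ln) "body_pred" then 1
  else if PySem.Str.startswith (PySem.Str.strip ln) "type(" || PySem.Str.startswith (PySem.Str.strip ln) "type " then 2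
  else if PySem.Str.startswith (PySem.Str.strip ln) "direction" then 3
  else 4

def pvWalk (prev : Int) (rest : List String) : List String :=
  match rest with
  | [] => []
  | ln :: t =>
    let r := pvRank ln
    if r != prev then ("% === " ++ PySem.List.pyGetD pvNames r "" ++ " ===") :: ln :: pvWalk r t
    else ln :: pvWalk prev t

def group_bias_lines_alt (lines : List String) : List String :=
  pvWalk (-1) (PySem.List.sorted (PySem.List.sorted lines (fun x => x)) pvRank)

-- ===== PRECONDITION & SPEC =====
def Spec_group_bias_lines (lines : List String) (out : List String) : Prop := out = group_bias_lines_alt lines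
instance (lines : List String) (out : List String) : Decidable (Spec_group_bias_lines lines out) := by unfold Spec_group_bias_lines; infer_instance

-- ===== CLAIM (what is proved, stated in full; the proofs are below) =====
def Claim_equal_group_bias_lines : Prop := ∀ (lines : List String), Dom_group_bias_lines lines → Spec_group_bias_lines lines (group_bias_lines lines)

-- ===== LEMMAS AND PROOFS =====

def pvFilt (r : Int) (ys : List String) : List String := ys.filter (fun ln => pvRank ln == r)

lemma pvRank_cases (ln : String) :
    pvRank ln = 0 ∨ pvRank ln = 1 ∨ pvRank ln = 2 ∨ pvRank ln = 3 ∨ pvRank ln = 4 := by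
  unfold pvRank; split_ifs <;> simp

-- A's classification fold produces exactly the five rank filters
lemma gbl_fold (lines : List String) (c : gblCats) :
    lines.foldl gblStep c =
      (c.1 ++ pvFilt 0 lines, c.2.1 ++ pvFilt 1 lines, c.2.2.1 ++ pvFilt 2 lines,
        c.2.2.2.1 ++ pvFilt 3 lines, c.2.2.2.2 ++ pvFilt 4 lines) := by
  induction lines generalizing c with
  | nil => simp [pvFilt]
  | cons x t ih =>
    rw [List.foldl_cons, ih]
    have hfc : ∀ (i : Int), pvFilt i (x :: t) = if pvRank x = i then x :: pvFilt i t else pvFilt i t := by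
      intro i
      by_cases h : pvRank x = i <;> simp [pvFilt, h]
    unfold gblStep
    split_ifs with h1 h2 h3 h4
    · have hr : pvRank x = 0 := by unfold pvRank; rw [if_pos h1]
      simp [hfc, hr]
    · have hr : pvRank x = 1 := by unfold pvRank; rw [if_neg h1, if_pos h2]
      simp [hfc, hr]
    · have hr : pvRank x = 2 := by unfold pvRank; rw [if_neg h1, if_neg h2, if_pos h3]
      simp [hfc, hr]
    · have hr : pvRank x = 3 := by unfold pvRank; rw [if_neg h1, if_neg h2, if_neg h3, if_pos h4]
      simp [hfc, hr]
    · have hr : pvRank x = 4 := by unfold pvRank; rw [if_neg h1, if_neg h2, if_neg h3, if_neg h4]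
      simp [hfc, hr]

lemma insertBy_skip (before : String → String → Bool) (x : String) (as bs : List String)
    (ha : ∀ a ∈ as, before x a = false) :
    PySem.List.insertBy before x (as ++ bs) = as ++ PySem.List.insertBy before x bs := by
  induction as with
  | nil => simp
  | cons a t ih =>
    simp [PySem.List.insertBy, ha a (by simp), ih (fun a' h => ha a' (by simp [h]))]

lemma insertBy_head (before : String → String → Bool) (x : String) (bs : List String)
    (hb : ∀ b ∈ bs, before x b = true) :
    PySem.List.insertBy before x bs = x :: bs := by
  cases bs with
  | nil => simp [PySem.List.insertBy]
  | cons b t => simp [PySem.List.insertBy, hb b (by simp)]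

-- stable sort by rank = the five rank-filter blocks in rank order
lemma sorted_rank_blocks (ys : List String) :
    PySem.List.sorted ys pvRank =
      pvFilt 0 ys ++ pvFilt 1 ys ++ pvFilt 2 ys ++ pvFilt 3 ys ++ pvFilt 4 ys := by
  rw [PySem.List.sorted_eq_foldl_insertBy]
  induction ys using List.reverseRecOn with
  | nil => simp [pvFilt]
  | append_singleton t x ih =>
    rw [List.foldl_append, List.foldl_cons, List.foldl_nil, ih]
    have hmem : ∀ (i : Int) a, a ∈ pvFilt i t → pvRank a = i := by
      intro i a ha
      simp only [pvFilt, List.mem_filter, beq_iff_eq] at ha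
      exact ha.2
    have hfx : ∀ (i : Int), pvRank x ≠ i → pvFilt i (t ++ [x]) = pvFilt i t := by
      intro i hne
      simp [pvFilt, List.filter_append, hne]
    have hfx' : ∀ (i : Int), pvRank x = i → pvFilt i (t ++ [x]) = pvFilt i t ++ [x] := by
      intro i he
      simp [pvFilt, List.filter_append, he]
    simp only [List.append_assoc]
    rcases pvRank_cases x with h | h | h | h | h
    · rw [insertBy_skip _ x (pvFilt 0 t) _ (fun a ha => by simp [hmem _ _ ha, h]),
        insertBy_head _ x _ (fun b hb => by
          simp only [List.mem_append] at hb
          rcases hb with (hb | (hb | (hb | hb))) <;> simp [hmem _ _ hb, h]),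
        hfx' 0 h, hfx 1 (by omega), hfx 2 (by omega), hfx 3 (by omega), hfx 4 (by omega)]
      simp
    · rw [insertBy_skip _ x (pvFilt 0 t) _ (fun a ha => by simp [hmem _ _ ha, h]),
        insertBy_skip _ x (pvFilt 1 t) _ (fun a ha => by simp [hmem _ _ ha, h]),
        insertBy_head _ x _ (fun b hb => by
          simp only [List.mem_append] at hb
          rcases hb with (hb | (hb | hb)) <;> simp [hmem _ _ hb, h]),
        hfx 0 (by omega), hfx' 1 h, hfx 2 (by omega), hfx 3 (by omega), hfx 4 (by omega)]
      simp
    · rw [insertBy_skip _ x (pvFilt 0 t) _ (fun a ha => by simp [hmem _ _ ha, h]),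
        insertBy_skip _ x (pvFilt 1 t) _ (fun a ha => by simp [hmem _ _ ha, h]),
        insertBy_skip _ x (pvFilt 2 t) _ (fun a ha => by simp [hmem _ _ ha, h]),
        insertBy_head _ x _ (fun b hb => by
          simp only [List.mem_append] at hb
          rcases hb with (hb | hb) <;> simp [hmem _ _ hb, h]),
        hfx 0 (by omega), hfx 1 (by omega), hfx' 2 h, hfx 3 (by omega), hfx 4 (by omega)]
      simp
    · rw [insertBy_skip _ x (pvFilt 0 t) _ (fun a ha => by simp [hmem _ _ ha, h]),
        insertBy_skip _ x (pvFilt 1 t) _ (fun a ha => by simp [hmem _ _ ha, h]),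
        insertBy_skip _ x (pvFilt 2 t) _ (fun a ha => by simp [hmem _ _ ha, h]),
        insertBy_skip _ x (pvFilt 3 t) _ (fun a ha => by simp [hmem _ _ ha, h]),
        insertBy_head _ x _ (fun b hb => by simp [hmem _ _ hb, h]),
        hfx 0 (by omega), hfx 1 (by omega), hfx 2 (by omega), hfx' 3 h, hfx 4 (by omega)]
      simp
    · rw [insertBy_skip _ x (pvFilt 0 t) _ (fun a ha => by simp [hmem _ _ ha, h]),
        insertBy_skip _ x (pvFilt 1 t) _ (fun a ha => by simp [hmem _ _ ha, h]),
        insertBy_skip _ x (pvFilt 2 t) _ (fun a ha => by simp [hmem _ _ ha, h]),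
        insertBy_skip _ x (pvFilt 3 t) _ (fun a ha => by simp [hmem _ _ ha, h]),
        PySem.List.insertBy_of_forall_not_before _ x (pvFilt 4 t)
          (fun a ha => by simp [hmem _ _ ha, h]),
        hfx 0 (by omega), hfx 1 (by omega), hfx 2 (by omega), hfx 3 (by omega), hfx' 4 h]

-- the sorted copy of a rank bucket is the rank filter of the sorted line list
lemma sorted_filter (lines : List String) (r : Int) :
    PySem.List.sorted (pvFilt r lines) (fun x => x) =
      pvFilt r (PySem.List.sorted lines (fun x => x)) := by
  apply PySem.List.sorted_id_eq_of_perm_of_pairwise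
  · exact (PySem.List.sorted_perm lines (fun x => x) false).filter _
  · exact List.Pairwise.sublist List.filter_sublist
      (PySem.List.sorted_pairwise lines (fun x => x))

lemma pvWalk_same (r : Int) (c rest : List String) (hc : ∀ l ∈ c, pvRank l = r) :
    pvWalk r (c ++ rest) = c ++ pvWalk r rest := by
  induction c with
  | nil => simp
  | cons a t ih =>
    have : pvRank a = r := hc a (by simp)
    simp [pvWalk, this, ih (fun l h => hc l (by simp [h]))]

lemma pvWalk_block (prev r : Int) (c rest : List String) (hne : c ≠ [])
    (hc : ∀ l ∈ c, pvRank l = r) (hp : prev ≠ r) :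
    pvWalk prev (c ++ rest) =
      ("% === " ++ PySem.List.pyGetD pvNames r "" ++ " ===") :: (c ++ pvWalk r rest) := by
  cases c with
  | nil => exact absurd rfl hne
  | cons a t =>
    have ha : pvRank a = r := hc a (by simp)
    have hb : (r != prev) = true := by simp [bne_iff_ne]; omega
    simp [pvWalk, ha, hb, pvWalk_same r t rest (fun l h => hc l (by simp [h]))]

def pvSegB (r : Int) (c : List String) : List String :=
  if c = [] then [] else ("% === " ++ PySem.List.pyGetD pvNames r "" ++ " ===") :: c

lemma pvWalk_chain (rs : List Int) (prev : Int) (f : Int → List String)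
    (hr : ∀ r ∈ rs, ∀ l ∈ f r, pvRank l = r) (hlt : ∀ r ∈ rs, prev < r)
    (hpw : rs.Pairwise (· < ·)) :
    pvWalk prev (rs.flatMap f) = rs.flatMap (fun r => pvSegB r (f r)) := by
  induction rs generalizing prev with
  | nil => simp [pvWalk]
  | cons r rs' ih =>
    rw [List.flatMap_cons, List.flatMap_cons]
    by_cases hfe : f r = []
    · rw [hfe]
      simp only [pvSegB, if_true, List.nil_append]
      exact ih prev (fun r' h => hr r' (by simp [h])) (fun r' h => hlt r' (by simp [h]))
        (List.Pairwise.sublist (by simp) hpw)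
    · rw [pvWalk_block prev r (f r) _ hfe (hr r (by simp)) (by have := hlt r (by simp); omega)]
      rw [ih r (fun r' h => hr r' (by simp [h]))
        (fun r' h => (List.pairwise_cons.mp hpw).1 r' h)
        (List.Pairwise.sublist (by simp) hpw)]
      simp [pvSegB, hfe]

lemma seg_eq (lines : List String) (r : Int) (key : String)
    (hk : ("% === " ++ key ++ " ===") = ("% === " ++ PySem.List.pyGetD pvNames r "" ++ " ===")) :
    gblSeg key (pvFilt r lines) = pvSegB r (pvFilt r (PySem.List.sorted lines (fun x => x))) := by
  unfold gblSeg pvSegB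
  rw [← sorted_filter]
  by_cases hE : pvFilt r lines = []
  · simp [hE, PySem.List.sorted_eq_nil_iff]
  · rw [if_neg (by simpa using hE),
      if_neg (by simp [PySem.List.sorted_eq_nil_iff, hE]), hk]

-- ===== VERDICT (by name: the statement is the Claim_ definition above) =====
theorem group_bias_lines_spec : Claim_equal_group_bias_lines := by
  intro lines _
  unfold Spec_group_bias_lines group_bias_lines group_bias_lines_alt
  rw [gbl_fold lines ([], [], [], [], []), sorted_rank_blocks]
  have h01 : pvFilt 0 (PySem.List.sorted lines fun x => x) ++
      pvFilt 1 (PySem.List.sorted lines fun x => x) ++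
      pvFilt 2 (PySem.List.sorted lines fun x => x) ++
      pvFilt 3 (PySem.List.sorted lines fun x => x) ++
      pvFilt 4 (PySem.List.sorted lines fun x => x) =
      ([0, 1, 2, 3, 4] : List Int).flatMap
        (fun r => pvFilt r (PySem.List.sorted lines fun x => x)) := by
    simp [List.flatMap_cons]
  rw [h01, pvWalk_chain ([0, 1, 2, 3, 4]) (-1)
      (fun r => pvFilt r (PySem.List.sorted lines fun x => x))
      (by intro r hrs l hl
          simp only [pvFilt, List.mem_filter, beq_iff_eq] at hl
          exact hl.2)
      (by intro r h; fin_cases h <;> omega)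
      (by simp)]
  simp only [List.flatMap_cons, List.flatMap_nil, List.append_nil, List.nil_append]
  rw [seg_eq lines 0 "head_pred" rfl, seg_eq lines 1 "body_pred" rfl,
    seg_eq lines 2 "type" rfl, seg_eq lines 3 "direction" rfl, seg_eq lines 4 "other" rfl]
  simp [List.append_assoc]
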